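-- pv_equiv track=rewrite | github.com/Qic0/asberry-vpn | app/services/vpn_service.py | _generate_unique_email
-- ===== SOURCE A (Python) =====
-- def _generate_unique_email(clients: list, base_email: str) -> str:
--     """
--     Генерирует уникальное имя клиента:
--     tg_123
--     tg_123/1
--     tg_123/2
--     ...
--     """
--     existing_emails = {c.get("email") for c in clients if c.get("email")}
--
--     if base_email not in existing_emails:
--         return base_email
--
--     index = 1
--     while True:
--         candidate = f"{base_email}/{index}"
--         if candidate not in existing_emails:
--             return candidate
--         index += 1
-- ===== SOURCE B (Python) =====
-- def _generate_unique_email(clients: list, base_email: str) -> str: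
--     # Different algorithm: instead of probing candidate strings against a set of
--     # all emails, parse each email's "/<n>" suffix into an integer, collect the
--     # set of used indices, and compute the minimal free index by a sorted scan
--     # (mex) -- no string-membership probing at all.
--     prefix = base_email + "/"
--     base_used = False
--     used = set()
--     for c in clients:
--         e = c.get("email")
--         if not e:
--             continue
--         if e == base_email:
--             base_used = True
--         elif e.startswith(prefix):
--             t = e[len(prefix):]
--             # only canonical decimals count: str(i) never has leading zeros
--             if t and all("0" <= ch <= "9" for ch in t) and t[0] != "0":
--                 used.add(int(t))
--     if not base_used:
--         return base_email
--     i = 1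
--     for v in sorted(used):
--         if v == i:
--             i += 1
--         elif v > i:
--             break
--     return f"{base_email}/{i}"
-- ===== Notes on version B (the rewrite author's own statement) =====
-- stated objective: alternative
-- what changed: A probes candidate strings f"{base}/1", f"{base}/2", ... against a set of all emails; B never probes strings: it parses each email's canonical "/<n>" suffix into the integer n, collects the set of used indices, and returns the minimal free index found by a single scan of the sorted index set (mex).
import Mathlib
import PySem

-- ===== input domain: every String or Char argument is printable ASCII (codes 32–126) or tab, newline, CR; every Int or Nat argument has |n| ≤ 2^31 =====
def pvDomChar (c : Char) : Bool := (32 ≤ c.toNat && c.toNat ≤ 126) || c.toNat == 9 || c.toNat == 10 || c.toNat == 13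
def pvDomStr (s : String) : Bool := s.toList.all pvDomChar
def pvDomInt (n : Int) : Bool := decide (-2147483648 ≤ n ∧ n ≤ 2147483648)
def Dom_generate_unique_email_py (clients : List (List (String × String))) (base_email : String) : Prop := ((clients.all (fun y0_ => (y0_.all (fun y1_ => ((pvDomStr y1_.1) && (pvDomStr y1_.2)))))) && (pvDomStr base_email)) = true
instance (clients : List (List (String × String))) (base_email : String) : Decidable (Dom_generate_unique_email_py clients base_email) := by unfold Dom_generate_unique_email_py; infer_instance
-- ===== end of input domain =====

-- B replaces A's string probing (candidate f"{base}/{i}" against the set of all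
-- emails) by an integer algorithm: each email's canonical "/<n>" suffix is parsed
-- to the integer n, the set of used indices is collected, and the answer index is
-- the minimal free one, found by a scan of the sorted index set (objective: alternative).

-- ===== PORT A =====
-- c.get("email") with the comprehension's 'if c.get("email")' truthiness filter
-- (falsy = missing key or empty string); strings are modelled as List Char.
def pvGetEmail? (c : List (String × String)) : Option (List Char) :=
  match PySem.Dict.get? (PySem.Dict.mk c) "email" with
  | some e => if e.toList = [] then none else some e.toList
  | none => none

-- f"{base_email}/{index}" (index is a non-negative Python int here)
def pvCand (b : List Char) (i : Nat) : List Char := b ++ '/' :: PySem.Int.toChars (i : Int)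

-- the 'while True' probe loop; fuel only makes it total (fuel = |set|+1 always
-- suffices, proved below — the 0 branch is unreachable)
def pvLoopA (ex : PySem.Set (List Char)) (b : List Char) (i fuel : Nat) : List Char :=
  match fuel with
  | 0 => pvCand b i
  | f+1 => if PySem.Set.contains ex (pvCand b i) then pvLoopA ex b (i+1) f else pvCand b i

def generate_unique_email_py (clients : List (List (String × String))) (base_email : String) : String :=
  let ex : PySem.Set (List Char) := PySem.Set.ofList (clients.filterMap pvGetEmail?)
  if PySem.Set.contains ex base_email.toList then
    String.ofList (pvLoopA ex base_email.toList 1 (ex.length + 1))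
  else base_email

-- ===== PORT B =====
-- int(t) for a string of ASCII digits (the only case B reaches it, guarded by
-- pvCanon below): the exact decimal-value fold
def pvDecVal (t : List Char) : Nat := t.foldl (fun a c => a * 10 + (c.toNat - 48)) 0

-- Source B's guard 't and all("0" <= ch <= "9" for ch in t) and t[0] != "0"'
-- (t[0] via head?, safe: only consulted when t is nonempty)
def pvCanon (t : List Char) : Bool :=
  !t.isEmpty && t.all (fun ch => decide ('0' ≤ ch) && decide (ch ≤ '9')) && decide (t.head? ≠ some '0')

-- one iteration of Source B's classifying loop over clients
def pvStepB (b : List Char) (st : Bool × PySem.Set Int) (c : List (String × String)) :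
    Bool × PySem.Set Int :=
  match PySem.Dict.get? (PySem.Dict.mk c) "email" with
  | none => st
  | some e =>
      let el := e.toList
      if el = [] then st
      else if el = b then (true, st.2)
      else if PySem.Chars.startswith el (b ++ ['/']) then
        let t := el.drop (b.length + 1)
        if pvCanon t then (st.1, PySem.Set.add st.2 (pvDecVal t : Int)) else st
      else st

-- Source B's 'for v in sorted(used): if v == i: i += 1 elif v > i: break'
def pvScan : List Int → Int → Int
  | [], i => i
  | v :: vs, i => if v = i then pvScan vs (i + 1) else if i < v then i else pvScan vs i

def generate_unique_email_py_alt (clients : List (List (String × String))) (base_email : String) : String :=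
  let b := base_email.toList
  let st := clients.foldl (pvStepB b) (false, (PySem.Set.empty : PySem.Set Int))
  if st.1 then
    String.ofList (b ++ '/' :: PySem.Int.toChars (pvScan (PySem.List.sorted st.2 id) 1))
  else base_email

-- ===== PRECONDITION & SPEC =====
def Spec_generate_unique_email_py (clients : List (List (String × String))) (base_email : String) (out : String) : Prop := out = generate_unique_email_py_alt clients base_email
instance (clients : List (List (String × String))) (base_email : String) (out : String) : Decidable (Spec_generate_unique_email_py clients base_email out) := by unfold Spec_generate_unique_email_py; infer_instance

-- ===== CLAIM (what is proved, stated in full; the proofs are below) =====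
def Claim_equal_generate_unique_email_py : Prop := ∀ (clients : List (List (String × String))) (base_email : String), Dom_generate_unique_email_py clients base_email → Spec_generate_unique_email_py clients base_email (generate_unique_email_py clients base_email)

-- ===== LEMMAS AND PROOFS =====

-- digit-character arithmetic
lemma pv_le_toNat {c d : Char} (h : c ≤ d) : c.toNat ≤ d.toNat := by
  simpa [Char.le_def, UInt32.le_iff_toNat_le] using h

lemma pv_digitChar_round {c : Char} (h1 : 48 ≤ c.toNat) (h2 : c.toNat ≤ 57) :
    Nat.digitChar (c.toNat - 48) = c := by
  have := Char.ofNat_toNat c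
  interval_cases h3 : c.toNat <;> (rw [← this]; decide)

lemma pv_toNat48 {c : Char} (h : c.toNat = 48) : c = '0' := by
  have := Char.ofNat_toNat c
  rw [← this, h]

lemma pv_digitChar_toNat : ∀ m < 10, (Nat.digitChar m).toNat = m + 48 := by decide

lemma pv_digitChar_digit : ∀ m < 10, '0' ≤ Nat.digitChar m ∧ Nat.digitChar m ≤ '9' := by decide

lemma pv_digitChar_ne0 : ∀ m, 1 ≤ m → m < 10 → Nat.digitChar m ≠ '0' := by decide

lemma pv_decVal_append (t : List Char) (c : Char) :
    pvDecVal (t ++ [c]) = 10 * pvDecVal t + (c.toNat - 48) := by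
  simp [pvDecVal, List.foldl_append]
  ring

lemma pv_canon_iff (t : List Char) : pvCanon t = true ↔
    t ≠ [] ∧ (∀ c ∈ t, '0' ≤ c ∧ c ≤ '9') ∧ t.head? ≠ some '0' := by
  simp [pvCanon, List.all_eq_true, and_assoc]

-- str(n) (n ≥ 0) is Nat.toDigits
lemma pv_toChars_nat (n : Nat) : PySem.Int.toChars (n : Int) = Nat.toDigits 10 n := by
  simp [PySem.Int.toChars]

-- L1: str(n) for n ≥ 1 is canonical and its decimal value is n
lemma pv_toDigits_canon (n : Nat) (hn : 1 ≤ n) :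
    pvCanon (Nat.toDigits 10 n) = true ∧ pvDecVal (Nat.toDigits 10 n) = n := by
  induction n using Nat.strong_induction_on with
  | _ n ih =>
    by_cases h10 : n < 10
    · rw [Nat.toDigits_of_lt_base h10]
      constructor
      · rw [pv_canon_iff]
        refine ⟨by simp, ?_, ?_⟩
        · intro c hc
          rw [List.mem_singleton] at hc; subst hc
          exact pv_digitChar_digit n h10
        · simp only [List.head?_cons, ne_eq, Option.some_inj]
          exact pv_digitChar_ne0 n hn h10
      · simp [pvDecVal, pv_digitChar_toNat n h10]
    · rw [Nat.toDigits_eq_if (b := 10) (n := n) (by norm_num), if_neg h10]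
      have hd : 1 ≤ n / 10 := by omega
      have hlt : n / 10 < n := Nat.div_lt_self (by omega) (by norm_num)
      obtain ⟨hc', hv'⟩ := ih (n / 10) hlt hd
      rw [pv_canon_iff] at hc'
      obtain ⟨hne, hdig, hhd⟩ := hc'
      have hm : n % 10 < 10 := Nat.mod_lt _ (by norm_num)
      constructor
      · rw [pv_canon_iff]
        refine ⟨by simp, ?_, ?_⟩
        · intro c hc
          rcases List.mem_append.mp hc with h | h
          · exact hdig c h
          · rw [List.mem_singleton] at h; subst h
            exact pv_digitChar_digit _ hm
        · obtain ⟨a, rest, hT⟩ := List.exists_cons_of_ne_nil hne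
          rw [hT] at hhd ⊢
          simpa using hhd
      · rw [pv_decVal_append, hv', pv_digitChar_toNat _ hm]
        omega

-- L2: a canonical digit string is str of its value, and its value is ≥ 1
lemma pv_canon_toDigits (t : List Char) (h : pvCanon t = true) :
    1 ≤ pvDecVal t ∧ Nat.toDigits 10 (pvDecVal t) = t := by
  induction t using List.reverseRecOn with
  | nil => rw [pv_canon_iff] at h; exact absurd rfl h.1
  | append_singleton t' c ih =>
    rw [pv_canon_iff] at h
    obtain ⟨-, hdig, hhd⟩ := h
    have hc : '0' ≤ c ∧ c ≤ '9' := hdig c (by simp)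
    have hc48 : 48 ≤ c.toNat := by simpa using pv_le_toNat hc.1
    have hc57 : c.toNat ≤ 57 := by simpa using pv_le_toNat hc.2
    by_cases ht' : t' = []
    · subst ht'
      have hval : pvDecVal [c] = c.toNat - 48 := by simp [pvDecVal]
      have hne0 : c ≠ '0' := by simpa using hhd
      have h49 : 49 ≤ c.toNat := by
        rcases Nat.lt_or_ge c.toNat 49 with h | h
        · exact absurd (pv_toNat48 (by omega)) hne0
        · exact h
      simp only [List.nil_append] at *
      refine ⟨by omega, ?_⟩
      rw [hval, Nat.toDigits_of_lt_base (by omega), pv_digitChar_round hc48 hc57]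
    · have hcanon' : pvCanon t' = true := by
        rw [pv_canon_iff]
        refine ⟨ht', fun d hd => hdig d (List.mem_append_left _ hd), ?_⟩
        obtain ⟨a, rest, rfl⟩ := List.exists_cons_of_ne_nil ht'
        simpa using hhd
      obtain ⟨hv1, hv2⟩ := ih hcanon'
      have hval := pv_decVal_append t' c
      have hd10 : c.toNat - 48 < 10 := by omega
      have hge : 10 ≤ pvDecVal (t' ++ [c]) := by omega
      refine ⟨by omega, ?_⟩
      rw [Nat.toDigits_eq_if (b := 10) (n := pvDecVal (t' ++ [c])) (by norm_num),
          if_neg (by omega)]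
      have hdiv : pvDecVal (t' ++ [c]) / 10 = pvDecVal t' := by omega
      have hmod : pvDecVal (t' ++ [c]) % 10 = c.toNat - 48 := by omega
      rw [hdiv, hmod, hv2, pv_digitChar_round hc48 hc57]

-- candidate shape: el = base/t ↔ B's classification reaches suffix t for el
lemma pv_shape (el b t : List Char) :
    el = b ++ '/' :: t ↔
      (el ≠ b ∧ PySem.Chars.startswith el (b ++ ['/']) = true ∧ el.drop (b.length + 1) = t) := by
  constructor
  · rintro rfl
    refine ⟨?_, ?_, ?_⟩
    · intro h
      have := congrArg List.length h
      simp at this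
    · rw [PySem.Chars.startswith_iff]
      exact ⟨t, by simp⟩
    · have : b.length + 1 = (b ++ ['/']).length := by simp
      rw [this, show b ++ '/' :: t = (b ++ ['/']) ++ t by simp, List.drop_left]
  · rintro ⟨-, hs, hd⟩
    rw [PySem.Chars.startswith_iff] at hs
    obtain ⟨t', rfl⟩ := hs
    have : b.length + 1 = (b ++ ['/']).length := by simp
    rw [this, List.drop_left] at hd
    simp [hd]

-- the final flag of B's pass = "base_email occurs among the truthy emails"
lemma pv_foldl_fst (b : List Char) (clients : List (List (String × String))) :
    ∀ st : Bool × PySem.Set Int,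
      (clients.foldl (pvStepB b) st).1
        = (st.1 || decide (b ∈ clients.filterMap pvGetEmail?)) := by
  induction clients with
  | nil => simp
  | cons c cs ih =>
    intro st
    simp only [List.foldl_cons, List.filterMap_cons]
    cases h : PySem.Dict.get? (PySem.Dict.mk c) "email" with
    | none =>
      have hg : pvGetEmail? c = none := by simp [pvGetEmail?, h]
      have hs : pvStepB b st c = st := by simp [pvStepB, h]
      simp only [hg, hs]
      exact ih st
    | some e =>
      by_cases he : e.toList = []
      · have hg : pvGetEmail? c = none := by simp [pvGetEmail?, h, he]
        have hs : pvStepB b st c = st := by simp [pvStepB, h, he]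
        simp only [hg, hs]
        exact ih st
      · have hg : pvGetEmail? c = some e.toList := by simp [pvGetEmail?, h, he]
        simp only [hg]
        by_cases hb : e.toList = b
        · have hbne : b ≠ [] := hb ▸ he
          have hs : pvStepB b st c = (true, st.2) := by simp [pvStepB, h, hbne, hb]
          rw [hs, ih]
          simp [hb]
        · have hb' : b ≠ e.toList := fun hh => hb hh.symm
          have h1 : (pvStepB b st c).1 = st.1 := by
            by_cases hp : PySem.Chars.startswith e.toList (b ++ ['/']) = true
            · by_cases hcn : pvCanon (e.toList.drop (b.length + 1)) = true <;>
                simp [pvStepB, h, he, hb, hp, hcn]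
            · simp [pvStepB, h, he, hb, hp]
          rw [ih, h1]
          simp [hb']

-- membership in B's used-index set
lemma pv_foldl_snd (b : List Char) (clients : List (List (String × String))) :
    ∀ (st : Bool × PySem.Set Int) (x : Int),
      x ∈ (clients.foldl (pvStepB b) st).2
        ↔ x ∈ st.2 ∨ ∃ el ∈ clients.filterMap pvGetEmail?,
            el ≠ b ∧ PySem.Chars.startswith el (b ++ ['/']) = true ∧
            pvCanon (el.drop (b.length + 1)) = true ∧
            ((pvDecVal (el.drop (b.length + 1)) : Nat) : Int) = x := by
  induction clients with
  | nil => simp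
  | cons c cs ih =>
    intro st x
    simp only [List.foldl_cons, List.filterMap_cons]
    cases h : PySem.Dict.get? (PySem.Dict.mk c) "email" with
    | none =>
      have hg : pvGetEmail? c = none := by simp [pvGetEmail?, h]
      have hs : pvStepB b st c = st := by simp [pvStepB, h]
      simp only [hg, hs]
      exact ih st x
    | some e =>
      by_cases he : e.toList = []
      · have hg : pvGetEmail? c = none := by simp [pvGetEmail?, h, he]
        have hs : pvStepB b st c = st := by simp [pvStepB, h, he]
        simp only [hg, hs]
        exact ih st x
      · have hg : pvGetEmail? c = some e.toList := by simp [pvGetEmail?, h, he]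
        simp only [hg]
        by_cases hb : e.toList = b
        · have hbne : b ≠ [] := hb ▸ he
          have hs : pvStepB b st c = (true, st.2) := by simp [pvStepB, h, hbne, hb]
          rw [hs, ih]
          simp only [List.mem_cons]
          constructor
          · rintro (hx | ⟨el, hel, h1, h2, h3⟩)
            · exact Or.inl hx
            · exact Or.inr ⟨el, Or.inr hel, h1, h2, h3⟩
          · rintro (hx | ⟨el, rfl | hel, h1, h2, h3⟩)
            · exact Or.inl hx
            · exact absurd hb h1
            · exact Or.inr ⟨el, hel, h1, h2, h3⟩
        · by_cases hp : PySem.Chars.startswith e.toList (b ++ ['/']) = true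
          · by_cases hcn : pvCanon (e.toList.drop (b.length + 1)) = true
            · have hs : pvStepB b st c
                  = (st.1, PySem.Set.add st.2 ((pvDecVal (e.toList.drop (b.length + 1)) : Nat) : Int)) := by
                simp [pvStepB, h, he, hb, hp, hcn]
              rw [hs, ih]
              simp only [PySem.Set.mem_add, List.mem_cons]
              constructor
              · rintro (⟨hx | rfl⟩ | ⟨el, hel, h1, h2, h3, h4⟩)
                · exact Or.inl hx
                · exact Or.inr ⟨e.toList, Or.inl rfl, hb, hp, hcn, rfl⟩
                · exact Or.inr ⟨el, Or.inr hel, h1, h2, h3, h4⟩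
              · rintro (hx | ⟨el, rfl | hel, h1, h2, h3, h4⟩)
                · exact Or.inl (Or.inl hx)
                · exact Or.inl (Or.inr h4.symm)
                · exact Or.inr ⟨el, hel, h1, h2, h3, h4⟩
            · have hs : pvStepB b st c = st := by simp [pvStepB, h, he, hb, hp, hcn]
              rw [hs, ih]
              constructor
              · rintro (hx | ⟨el, hel, h1, h2, h3, h4⟩)
                · exact Or.inl hx
                · exact Or.inr ⟨el, List.mem_cons_of_mem _ hel, h1, h2, h3, h4⟩
              · rintro (hx | ⟨el, hel, h1, h2, h3, h4⟩)
                · exact Or.inl hx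
                · rcases List.mem_cons.mp hel with rfl | hel'
                  · exact absurd h3 hcn
                  · exact Or.inr ⟨el, hel', h1, h2, h3, h4⟩
          · have hs : pvStepB b st c = st := by simp [pvStepB, h, he, hb, hp]
            rw [hs, ih]
            constructor
            · rintro (hx | ⟨el, hel, h1, h2, h3, h4⟩)
              · exact Or.inl hx
              · exact Or.inr ⟨el, List.mem_cons_of_mem _ hel, h1, h2, h3, h4⟩
            · rintro (hx | ⟨el, hel, h1, h2, h3, h4⟩)
              · exact Or.inl hx
              · rcases List.mem_cons.mp hel with rfl | hel'
                · exact absurd h2 hp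
                · exact Or.inr ⟨el, hel', h1, h2, h3, h4⟩

-- the used-index set stays duplicate-free
lemma pv_foldl_nodup (b : List Char) (clients : List (List (String × String))) :
    ∀ st : Bool × PySem.Set Int, st.2.Nodup → ((clients.foldl (pvStepB b) st).2).Nodup := by
  induction clients with
  | nil => intro st h; simpa using h
  | cons c cs ih =>
    intro st h
    simp only [List.foldl_cons]
    apply ih
    unfold pvStepB
    cases hg : PySem.Dict.get? (PySem.Dict.mk c) "email" with
    | none => simpa using h
    | some e =>
      by_cases he : e.toList = []
      · simpa [he] using h
      · by_cases hb : e.toList = b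
        · have hbne : ¬(b = []) := by rw [← hb]; exact he
          simpa [he, hb, hbne] using h
        · by_cases hp : PySem.Chars.startswith e.toList (b ++ ['/']) = true <;>
            by_cases hcn : pvCanon (e.toList.drop (b.length + 1)) = true <;>
            simp [he, hb, hp, hcn, h, PySem.Set.nodup_add _ _ h]

-- key bridge: for j ≥ 1, A's probe condition at index j ↔ j is a used index of B
lemma pv_cond_iff (b : List Char) (clients : List (List (String × String))) (j : Nat) (hj : 1 ≤ j) :
    PySem.Set.contains (PySem.Set.ofList (clients.filterMap pvGetEmail?)) (pvCand b j) = true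
      ↔ ((j : Int) ∈ (clients.foldl (pvStepB b) (false, PySem.Set.empty)).2) := by
  rw [PySem.Set.contains_iff, PySem.Set.mem_ofList, pv_foldl_snd]
  simp only [PySem.Set.empty, List.not_mem_nil, false_or]
  constructor
  · intro hmem
    obtain ⟨hne, hsw, hdrop⟩ := (pv_shape (pvCand b j) b (PySem.Int.toChars (j : Int))).mp rfl
    refine ⟨pvCand b j, hmem, hne, hsw, ?_, ?_⟩
    · rw [hdrop, pv_toChars_nat]
      exact (pv_toDigits_canon j hj).1
    · rw [hdrop, pv_toChars_nat, (pv_toDigits_canon j hj).2]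
  · rintro ⟨el, hel, h1, h2, h3, h4⟩
    have hv : pvDecVal (el.drop (b.length + 1)) = j := by exact_mod_cast h4
    have ht : Nat.toDigits 10 j = el.drop (b.length + 1) := by
      rw [← hv]; exact (pv_canon_toDigits _ h3).2
    have : el = b ++ '/' :: PySem.Int.toChars (j : Int) := by
      apply (pv_shape el b _).mpr
      exact ⟨h1, h2, by rw [pv_toChars_nat, ← ht]⟩
    rw [show pvCand b j = b ++ '/' :: PySem.Int.toChars (j : Int) from rfl, ← this]
    exact hel

-- every used index is ≥ 1
lemma pv_used_pos (b : List Char) (clients : List (List (String × String))) :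
    ∀ x ∈ (clients.foldl (pvStepB b) (false, PySem.Set.empty)).2, 1 ≤ x := by
  intro x hx
  rw [pv_foldl_snd] at hx
  simp only [PySem.Set.empty, List.not_mem_nil, false_or] at hx
  obtain ⟨el, -, -, -, h3, h4⟩ := hx
  have := (pv_canon_toDigits _ h3).1
  omega

-- pigeonhole: among |s|+1 candidates with distinct indices ≥ 1, one is free
lemma pv_exists_free (s : PySem.Set (List Char)) (f : Nat → List Char)
    (hf : ∀ m n, f (1 + m) = f (1 + n) → m = n) :
    ∃ k, k < s.length + 1 ∧ PySem.Set.contains s (f (1 + k)) = false := by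
  by_contra hall
  push Not at hall
  have hmem : ∀ k < s.length + 1, f (1 + k) ∈ s := by
    intro k hk
    have := hall k hk
    rw [← PySem.Set.contains_iff]
    cases h : PySem.Set.contains s (f (1 + k)) with
    | false => exact absurd h this
    | true => rfl
  set L : List (List Char) := (List.range (s.length + 1)).map (fun k => f (1 + k)) with hL
  have hnd : L.Nodup := by
    refine List.Nodup.map ?_ (List.nodup_range)
    intro m n h
    exact hf _ _ h
  have hsub : L ⊆ s := by
    intro x hx
    rw [hL, List.mem_map] at hx
    obtain ⟨k, hk, rfl⟩ := hx
    exact hmem k (List.mem_range.mp hk)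
  have := (hnd.subperm hsub).length_le
  simp [hL] at this

-- A's probe loop returns the least free index ≥ its start
lemma pv_loopA_props (ex : PySem.Set (List Char)) (b : List Char) :
    ∀ (fuel i : Nat), (∃ k, k < fuel ∧ PySem.Set.contains ex (pvCand b (i + k)) = false) →
      ∃ j, pvLoopA ex b i fuel = pvCand b j ∧ i ≤ j ∧
        PySem.Set.contains ex (pvCand b j) = false ∧
        ∀ m, i ≤ m → m < j → PySem.Set.contains ex (pvCand b m) = true := by
  intro fuel
  induction fuel with
  | zero => rintro i ⟨k, hk, -⟩; omega
  | succ f ih =>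
    rintro i ⟨k, hk, hfree⟩
    rw [pvLoopA]
    cases hc : PySem.Set.contains ex (pvCand b i) with
    | false =>
      exact ⟨i, by simp, le_refl i, hc, fun m h1 h2 => by omega⟩
    | true =>
      rw [if_pos rfl]
      have hk0 : k ≠ 0 := by
        rintro rfl
        simp only [Nat.add_zero] at hfree
        rw [hfree] at hc; exact Bool.noConfusion hc
      obtain ⟨j, hj1, hj2, hj3, hj4⟩ :=
        ih (i + 1) ⟨k - 1, by omega, by rw [show i + 1 + (k - 1) = i + k by omega]; exact hfree⟩
      refine ⟨j, hj1, by omega, hj3, ?_⟩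
      intro m h1 h2
      rcases Nat.eq_or_lt_of_le h1 with rfl | h1'
      · exact hc
      · exact hj4 m h1' h2

-- B's scan of the strictly sorted used list returns the least free index ≥ its start
lemma pv_scan_props : ∀ (L : List Int), L.Pairwise (· < ·) →
    ∀ i : Int, (∀ x ∈ L, i ≤ x) →
      i ≤ pvScan L i ∧ pvScan L i ∉ L ∧ ∀ m : Int, i ≤ m → m < pvScan L i → m ∈ L := by
  intro L
  induction L with
  | nil =>
    intro _ i _
    have h0 : pvScan [] i = i := rfl
    exact ⟨by omega, by simp, fun m h1 h2 => by omega⟩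
  | cons v vs ih =>
    intro hpw i hlb
    have hvall : ∀ x ∈ vs, v < x := by
      intro x hx
      exact (List.pairwise_cons.mp hpw).1 x hx
    have hvs : vs.Pairwise (· < ·) := (List.pairwise_cons.mp hpw).2
    have hvi : i ≤ v := hlb v (List.mem_cons_self)
    by_cases hv : v = i
    · subst hv
      have hlb' : ∀ x ∈ vs, v + 1 ≤ x := fun x hx => by have := hvall x hx; omega
      obtain ⟨h1, h2, h3⟩ := ih hvs (v + 1) hlb'
      rw [show pvScan (v :: vs) v = pvScan vs (v + 1) from by simp [pvScan]]
      refine ⟨by omega, ?_, ?_⟩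
      · intro hmem
        rcases List.mem_cons.mp hmem with heq | hmem'
        · omega
        · exact h2 hmem'
      · intro m hm1 hm2
        rcases eq_or_lt_of_le hm1 with rfl | hm1'
        · exact List.mem_cons_self
        · exact List.mem_cons_of_mem _ (h3 m (by omega) hm2)
    · have hlt : i < v := lt_of_le_of_ne hvi (fun h => hv h.symm)
      rw [show pvScan (v :: vs) i = i from by simp [pvScan, hv, hlt]]
      refine ⟨le_refl i, ?_, fun m h1 h2 => by omega⟩
      intro hmem
      rcases List.mem_cons.mp hmem with rfl | hmem'
      · omega
      · have := hvall i hmem'; omega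

-- main equivalence
lemma pv_main (clients : List (List (String × String))) (base_email : String) :
    generate_unique_email_py clients base_email = generate_unique_email_py_alt clients base_email := by
  dsimp only [generate_unique_email_py, generate_unique_email_py_alt]
  have hflag : (List.foldl (pvStepB base_email.toList) (false, PySem.Set.empty) clients).1
      = PySem.Set.contains (PySem.Set.ofList (clients.filterMap pvGetEmail?)) base_email.toList := by
    rw [pv_foldl_fst]
    simp [PySem.Set.mem_ofList]
  rw [hflag]
  set b := base_email.toList
  set E := clients.filterMap pvGetEmail? with hE
  set ex : PySem.Set (List Char) := PySem.Set.ofList E with hex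
  set used : PySem.Set Int := (clients.foldl (pvStepB b) (false, PySem.Set.empty)).2 with hused
  cases hc : PySem.Set.contains ex b with
  | false => simp
  | true =>
    rw [if_pos rfl]
    -- A's side: least free index jA
    have hinj : ∀ m n, pvCand b (1 + m) = pvCand b (1 + n) → m = n := by
      intro m n h
      have h' : PySem.Int.toChars ((1 + m : Nat) : Int) = PySem.Int.toChars ((1 + n : Nat) : Int) := by
        unfold pvCand at h
        simpa using h
      rw [pv_toChars_nat, pv_toChars_nat] at h'
      have := congrArg pvDecVal h'
      rw [(pv_toDigits_canon (1 + m) (by omega)).2, (pv_toDigits_canon (1 + n) (by omega)).2] at this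
      omega
    obtain ⟨k, hk, hfree⟩ := pv_exists_free ex (pvCand b) hinj
    obtain ⟨jA, hA1, hA2, hA3, hA4⟩ :=
      pv_loopA_props ex b (ex.length + 1) 1 ⟨k, hk, hfree⟩
    -- B's side: scan of the sorted used list
    set L := PySem.List.sorted used id with hL
    have hperm : L.Perm used := PySem.List.sorted_perm used id false
    have hndup : L.Nodup := hperm.nodup_iff.mpr
      (pv_foldl_nodup b clients (false, PySem.Set.empty) (by simp [PySem.Set.empty]))
    have hple : L.Pairwise (fun a c => id a ≤ id c) := PySem.List.sorted_pairwise used id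
    have hplt : L.Pairwise (· < ·) := by
      have := List.Pairwise.and hple (List.nodup_iff_pairwise_ne.mp hndup)
      exact this.imp (fun ⟨h1, h2⟩ => lt_of_le_of_ne h1 h2)
    have hlb : ∀ x ∈ L, (1 : Int) ≤ x := fun x hx =>
      pv_used_pos b clients x (hperm.mem_iff.mp hx)
    obtain ⟨hB1, hB2, hB3⟩ := pv_scan_props L hplt 1 hlb
    set jB := pvScan L 1 with hjB
    -- bridge: membership in L ↔ A's condition, through pv_cond_iff
    have hbridge : ∀ m : Nat, 1 ≤ m →
        (PySem.Set.contains ex (pvCand b m) = true ↔ (m : Int) ∈ L) := by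
      intro m hm
      rw [hperm.mem_iff]
      exact pv_cond_iff b clients m hm
    -- jB = jA
    have hEq : jB = (jA : Int) := by
      have hnotA : ((jA : Int)) ∉ L := by
        intro hmem
        have := (hbridge jA hA2).mpr hmem
        rw [hA3] at this; exact Bool.noConfusion this
      have hle1 : jB ≤ (jA : Int) := by
        by_contra hgt
        push Not at hgt
        exact hnotA (hB3 (jA : Int) (by exact_mod_cast hA2) hgt)
      have hle2 : (jA : Int) ≤ jB := by
        by_contra hgt
        push Not at hgt
        have hjBn : 1 ≤ jB.toNat := by omega
        have hlt : jB.toNat < jA := by omega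
        have := hA4 jB.toNat hjBn hlt
        have hmem := (hbridge jB.toNat hjBn).mp this
        rw [show ((jB.toNat : Nat) : Int) = jB from by omega] at hmem
        exact hB2 hmem
      omega
    rw [hA1, hEq]
    rfl

-- ===== VERDICT (by name: the statement is the Claim_ definition above) =====
theorem generate_unique_email_py_spec : Claim_equal_generate_unique_email_py := by
  intro clients base_email _
  unfold Spec_generate_unique_email_py
  exact pv_main clients base_email
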